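-- pv_equiv track=rewrite | github.com/KimHS0915/programmers-learn-challenges | lv1/report.py | solution
-- ===== SOURCE A (Python) =====
-- def solution(id_list, report, k):
--     dic = {i: set() for i in id_list}
--     for i in report:
--         user, reported = i.split()
--         dic[reported].add(user)
--     mail_nums = {i: 0 for i in id_list}
--     for ids in dic.values():
--         if len(ids) >= k:
--             for user_id in ids:
--                 mail_nums[user_id] += 1
--     return list(mail_nums.values())
-- ===== SOURCE B (Python) =====
-- def solution(id_list, report, k):
--     pairs = set()
--     for r in report:
--         user, reported = r.split()
--         pairs.add((user, reported))
--     cnt = {}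
--     for _, reported in pairs:
--         cnt[reported] = cnt.get(reported, 0) + 1
--     mail = {i: 0 for i in id_list}
--     for user, reported in pairs:
--         if cnt[reported] >= k:
--             mail[user] += 1
--     return list(mail.values())
-- ===== Notes on version B (the rewrite author's own statement) =====
-- stated objective: alternative
-- what changed: Replaces A's per-id dict of reporter-sets and its nested iteration over grouped sets by one flat set of deduplicated (reporter, reported) pairs scanned twice: once to count distinct reports per reported id, once to credit reporters whose target reached k.
import Mathlib
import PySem

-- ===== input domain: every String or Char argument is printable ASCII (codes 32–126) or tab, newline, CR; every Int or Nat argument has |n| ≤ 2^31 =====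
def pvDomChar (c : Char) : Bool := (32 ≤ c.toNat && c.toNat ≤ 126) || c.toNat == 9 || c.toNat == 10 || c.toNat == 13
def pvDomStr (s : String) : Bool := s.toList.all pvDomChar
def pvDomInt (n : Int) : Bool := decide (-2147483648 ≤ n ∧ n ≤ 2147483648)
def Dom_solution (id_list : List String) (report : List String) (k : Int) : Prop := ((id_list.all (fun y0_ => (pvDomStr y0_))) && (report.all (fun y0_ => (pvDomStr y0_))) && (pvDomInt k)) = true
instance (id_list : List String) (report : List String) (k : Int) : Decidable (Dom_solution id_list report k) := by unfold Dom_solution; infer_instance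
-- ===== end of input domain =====

-- B replaces A's per-id dict of reporter-sets (and its nested iteration over grouped sets) by one
-- flat deduplicated set of (reporter, reported) pairs scanned twice with a plain counting dict;
-- a genuinely different decomposition of the same task, not claimed faster.


-- ===== PORT A =====
-- 'user reported' parsed from one report line (none = the line has not exactly 2 words)
def pvParse (s : String) : Option (String × String) :=
  match PySem.Str.split₀ s with
  | [] => none
  | u :: rest =>
    match rest with
    | [r] => some (u, r)
    | _ => none

def solution (id_list : List String) (report : List String) (k : Int) : List Int :=
  -- dic = {i: set() for i in id_list}
  let dic0 : PySem.Dict String (PySem.Set String) :=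
    id_list.foldl (fun d i => d.insert i PySem.Set.empty) PySem.Dict.empty
  -- for i in report: user, reported = i.split(); dic[reported].add(user)
  -- (Python raises ValueError on a line not splitting into 2 words and KeyError when
  --  reported is no key; both are excluded by Pre_solution, the port skips there)
  let dic : PySem.Dict String (PySem.Set String) :=
    report.foldl (fun d s =>
      match PySem.Str.split₀ s with
      | [user, reported] => d.modify reported PySem.Set.empty (fun t => t.add user)
      | _ => d) dic0
  -- mail_nums = {i: 0 for i in id_list}
  let mail0 : PySem.Dict String Int :=
    id_list.foldl (fun d i => d.insert i 0) PySem.Dict.empty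
  -- for ids in dic.values(): if len(ids) >= k: for user_id in ids: mail_nums[user_id] += 1
  -- (KeyError when user_id is no key is excluded by Pre_solution; modify inserts there)
  let mail : PySem.Dict String Int :=
    dic.values.foldl (fun m ids =>
      if k ≤ PySem.Set.len ids then
        ids.foldl (fun m u => m.modify u 0 (fun v => v + 1)) m
      else m) mail0
  mail.values

-- ===== PORT B =====
def solution_alt (id_list : List String) (report : List String) (k : Int) : List Int :=
  -- pairs = set(); for r in report: user, reported = r.split(); pairs.add((user, reported))
  -- (ValueError on a line not splitting into 2 words is excluded by Pre_solution)
  let pairs : PySem.Set (String × String) :=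
    report.foldl (fun t s =>
      match PySem.Str.split₀ s with
      | user :: reported :: [] => t.add (user, reported)
      | [] => t
      | [_] => t
      | _ :: _ :: _ :: _ => t) PySem.Set.empty
  -- cnt = {}; for _, reported in pairs: cnt[reported] = cnt.get(reported, 0) + 1
  let cnt : PySem.Dict String Int :=
    pairs.foldl (fun d p => d.insert p.2 (d.getD p.2 0 + 1)) PySem.Dict.empty
  -- mail = {i: 0 for i in id_list}
  let mail0 : PySem.Dict String Int :=
    id_list.foldl (fun d i => d.insert i 0) PySem.Dict.empty
  -- for user, reported in pairs: if cnt[reported] >= k: mail[user] += 1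
  -- (KeyError when user is no key is excluded by Pre_solution; modify inserts there)
  let mail : PySem.Dict String Int :=
    pairs.foldl (fun m p =>
      if k ≤ cnt.getD p.2 0 then m.modify p.1 0 (fun v => v + 1) else m) mail0
  mail.values

-- ===== PRECONDITION & SPEC =====
-- the distinct (reporter, reported) pairs of the report list, first occurrences in order
def pvDistinctReports (report : List String) : List (String × String) :=
  PySem.List.dedup (report.filterMap pvParse)

-- Pre_solution holds exactly where Python A returns normally, i.e. it excludes A's exceptions:
-- a report line without exactly two words (ValueError), a reported id outside id_list
-- (KeyError), and a reporter outside id_list whose reported id gathered ≥ k distinct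
-- reporters (KeyError while distributing the mails).
def Pre_solution (id_list : List String) (report : List String) (k : Int) : Prop :=
  ∀ s ∈ report, ∃ p ∈ (pvParse s).toList,
    p.2 ∈ id_list ∧
      (p.1 ∈ id_list ∨
        (((pvDistinctReports report).countP (fun q => q.2 == p.2) : Int) < k))
instance (id_list : List String) (report : List String) (k : Int) : Decidable (Pre_solution id_list report k) := by unfold Pre_solution; infer_instance

def pvWitness_solution : List String × List String × Int :=
  (["muzi", "frodo", "apeach"], ["muzi frodo", "apeach frodo", "muzi apeach"], 2)

def Spec_solution (id_list : List String) (report : List String) (k : Int) (out : List Int) : Prop := out = solution_alt id_list report k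
instance (id_list : List String) (report : List String) (k : Int) (out : List Int) : Decidable (Spec_solution id_list report k out) := by unfold Spec_solution; infer_instance

-- ===== CLAIM (what is proved, stated in full; the proofs are below) =====
def Claim_equal_solution : Prop := ∀ (id_list : List String) (report : List String) (k : Int), Dom_solution id_list report k → Pre_solution id_list report k → Spec_solution id_list report k (solution id_list report k)

-- ===== LEMMAS AND PROOFS =====

-- a fold over report that skips lines not parsing to two words is a fold over the parsed pairs
lemma pv_foldl_parse {γ : Type} (report : List String) (g : γ → String × String → γ) (a : γ) :
    report.foldl (fun acc s =>
      match PySem.Str.split₀ s with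
      | [u, r] => g acc (u, r)
      | _ => acc) a = (report.filterMap pvParse).foldl g a := by
  induction report generalizing a with
  | nil => rfl
  | cons s report ih =>
    simp only [List.foldl_cons, List.filterMap_cons]
    rcases hsp : PySem.Str.split₀ s with _ | ⟨u, _ | ⟨r, _ | l⟩⟩ <;>
      simp [pvParse, hsp, ih]

lemma pv_getD_insert_const {ν : Type} (l : List String) (v : ν) (d : PySem.Dict String ν)
    (x : String) (d0 : ν) :
    (l.foldl (fun d i => d.insert i v) d).getD x d0 = if x ∈ l then v else d.getD x d0 := by
  induction l generalizing d with
  | nil => simp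
  | cons a l ih =>
    simp only [List.foldl_cons, ih, List.mem_cons]
    by_cases hx : x ∈ l
    · simp [hx]
    · by_cases hxa : x = a
      · subst hxa; simp [hx, PySem.Dict.getD_insert_self]
      · simp [hx, hxa, PySem.Dict.getD_insert_of_ne _ _ _ hxa]

lemma pv_getD_dic (l : List (String × String)) (d : PySem.Dict String (PySem.Set String))
    (r : String) :
    (l.foldl (fun d p => d.modify p.2 PySem.Set.empty (fun t => t.add p.1)) d).getD r PySem.Set.empty
      = ((l.filter (fun p => p.2 == r)).map (·.1)).foldl PySem.Set.add (d.getD r PySem.Set.empty) := by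
  induction l generalizing d with
  | nil => simp
  | cons p l ih =>
    simp only [List.foldl_cons, ih, List.filter_cons]
    by_cases h : p.2 = r
    · simp [h]
    · simp [h, PySem.Dict.getD_modify, Ne.symm h]

lemma pv_mem_fst_filter (s : List (String × String)) (r u : String) :
    u ∈ (s.filter (fun p => p.2 == r)).map (·.1) ↔ (u, r) ∈ s := by
  simp only [List.mem_map, List.mem_filter, beq_iff_eq]
  constructor
  · rintro ⟨⟨a, b⟩, ⟨hp, h2⟩, h1⟩
    simp only at h1 h2
    subst h1; subst h2; exact hp
  · intro h; exact ⟨(u, r), ⟨h, rfl⟩, rfl⟩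

lemma pv_mem_snd_filter (s : List (String × String)) (i r : String) :
    r ∈ (s.filter (fun p => p.1 == i)).map (·.2) ↔ (i, r) ∈ s := by
  simp only [List.mem_map, List.mem_filter, beq_iff_eq]
  constructor
  · rintro ⟨⟨a, b⟩, ⟨hp, h2⟩, h1⟩
    simp only at h1 h2
    subst h1; subst h2; exact hp
  · intro h; exact ⟨(i, r), ⟨h, rfl⟩, rfl⟩

-- building the global pair set and then grouping by the reported id is grouping while building
lemma pv_filter_foldl_add (l : List (String × String)) (r : String)
    (s : PySem.Set (String × String)) :
    ((l.foldl PySem.Set.add s).filter (fun p => p.2 == r)).map (·.1)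
      = ((l.filter (fun p => p.2 == r)).map (·.1)).foldl PySem.Set.add
          ((s.filter (fun p => p.2 == r)).map (·.1)) := by
  induction l generalizing s with
  | nil => simp
  | cons p l ih =>
    obtain ⟨pu, pr⟩ := p
    simp only [List.foldl_cons, ih, List.filter_cons]
    by_cases h : pr = r
    · subst h
      have hacc : ((PySem.Set.add s (pu, pr)).filter (fun q => q.2 == pr)).map (·.1)
          = PySem.Set.add ((s.filter (fun q => q.2 == pr)).map (·.1)) pu := by
        unfold PySem.Set.add PySem.Set.contains
        by_cases hc : (pu, pr) ∈ s
        · rw [if_pos (List.contains_iff_mem.mpr hc),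
            if_pos (List.contains_iff_mem.mpr ((pv_mem_fst_filter s pr pu).mpr hc))]
        · rw [if_neg (by simpa using hc), if_neg (by
            intro hmem
            exact hc ((pv_mem_fst_filter s pr pu).mp (List.contains_iff_mem.mp hmem)))]
          simp [List.filter_append]
      simp [hacc]
    · have hacc : (PySem.Set.add s (pu, pr)).filter (fun q => q.2 == r)
          = s.filter (fun q => q.2 == r) := by
        unfold PySem.Set.add
        split
        · rfl
        · simp [List.filter_append, h]
      simp [h, hacc]

lemma pv_foldl_add_of_subset {α : Type} [BEq α] [LawfulBEq α] (l : List α) (s : List α)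
    (h : ∀ x ∈ l, x ∈ s) : l.foldl PySem.Set.add s = s := by
  induction l generalizing s with
  | nil => rfl
  | cons a l ih =>
    have ha : PySem.Set.add s a = s := by
      unfold PySem.Set.add PySem.Set.contains
      rw [if_pos (List.contains_iff_mem.mpr (h a (List.mem_cons_self)))]
    simp only [List.foldl_cons, ha]
    exact ih s (fun x hx => h x (List.mem_cons_of_mem _ hx))

lemma pv_set_update_of_subset {α : Type} [BEq α] [LawfulBEq α] (l : List α)
    (s : PySem.Set α) (h : ∀ x ∈ l, x ∈ s) : PySem.Set.update s l = s :=
  pv_foldl_add_of_subset l s h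

-- A's mail distribution, characterized on one key
lemma pv_A_outer (k : Int) (L : List (PySem.Set String)) (m : PySem.Dict String Int) (i : String) :
    (L.foldl (fun m ids => if k ≤ PySem.Set.len ids then
        ids.foldl (fun m u => m.modify u 0 (fun v => v + 1)) m else m) m).getD i 0
      = m.getD i 0
        + (L.map (fun ids => if k ≤ PySem.Set.len ids then (List.count i ids : Int) else 0)).sum := by
  induction L generalizing m with
  | nil => simp
  | cons ids L ih =>
    simp only [List.foldl_cons, List.map_cons, List.sum_cons, ih]
    by_cases h : k ≤ PySem.Set.len ids
    · simp only [h, if_true, PySem.Dict.getD_foldl_modify_add_one]; ring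
    · simp only [h, if_false]; ring

-- B's mail distribution, characterized on one key
lemma pv_B_mail (c : String × String → Prop) [DecidablePred c] (l : List (String × String))
    (m : PySem.Dict String Int) (i : String) :
    (l.foldl (fun m p => if c p then m.modify p.1 0 (fun v => v + 1) else m) m).getD i 0
      = m.getD i 0 + (l.countP (fun p => decide (c p) && p.1 == i) : Int) := by
  induction l generalizing m with
  | nil => simp
  | cons p l ih =>
    simp only [List.foldl_cons, ih, List.countP_cons]
    by_cases hc : c p
    · by_cases hi : p.1 = i
      · simp [hc, hi]
        ring
      · have : (i = p.1) = False := by simp [Ne.symm hi]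
        simp [hc, hi, PySem.Dict.getD_modify, this]
    · simp [hc]

lemma pv_keys_A_mail (k : Int) (L : List (PySem.Set String)) (m : PySem.Dict String Int)
    (h : ∀ ids ∈ L, k ≤ PySem.Set.len ids → ∀ u ∈ ids, u ∈ m.keys) :
    (L.foldl (fun m ids => if k ≤ PySem.Set.len ids then
        ids.foldl (fun m u => m.modify u 0 (fun v => v + 1)) m else m) m).keys = m.keys := by
  induction L generalizing m with
  | nil => rfl
  | cons ids L ih =>
    simp only [List.foldl_cons]
    by_cases hb : k ≤ PySem.Set.len ids
    · have hk : (ids.foldl (fun m u => m.modify u 0 (fun v => v + 1)) m).keys = m.keys := by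
        rw [PySem.Dict.keys_foldl_modify ids 0 (fun _ _ v => v + 1) m]
        exact pv_set_update_of_subset ids m.keys (h ids List.mem_cons_self hb)
      rw [if_pos hb, ih _ (fun j hj hbj u hu => by
        rw [hk]; exact h j (List.mem_cons_of_mem _ hj) hbj u hu), hk]
    · rw [if_neg hb]
      exact ih m (fun j hj => h j (List.mem_cons_of_mem _ hj))

lemma pv_keys_B_mail (c : String × String → Prop) [DecidablePred c] (l : List (String × String))
    (m : PySem.Dict String Int) (h : ∀ p ∈ l, c p → p.1 ∈ m.keys) :
    (l.foldl (fun m p => if c p then m.modify p.1 0 (fun v => v + 1) else m) m).keys = m.keys := by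
  induction l generalizing m with
  | nil => rfl
  | cons p l ih =>
    simp only [List.foldl_cons]
    by_cases hc : c p
    · have hk : (m.modify p.1 0 (fun v => v + 1)).keys = m.keys := by
        rw [PySem.Dict.keys_modify, PySem.Dict.keys_insert_of_contains]
        rw [PySem.Dict.contains_eq_decide_mem_keys]
        exact decide_eq_true (h p List.mem_cons_self hc)
      rw [if_pos hc, ih _ (fun q hq hcq => by rw [hk]; exact h q (List.mem_cons_of_mem _ hq) hcq), hk]
    · rw [if_neg hc]
      exact ih m (fun q hq => h q (List.mem_cons_of_mem _ hq))

-- specialized rewrites of the two report folds through pvParse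
lemma pv_dic_eq (report : List String) (d : PySem.Dict String (PySem.Set String)) :
    report.foldl (fun d s =>
      match PySem.Str.split₀ s with
      | [user, reported] => d.modify reported PySem.Set.empty (fun t => t.add user)
      | _ => d) d
    = (report.filterMap pvParse).foldl
        (fun d p => d.modify p.2 PySem.Set.empty (fun t => t.add p.1)) d :=
  pv_foldl_parse report (fun d p => d.modify p.2 PySem.Set.empty (fun t => t.add p.1)) d

lemma pv_pairs_eq (report : List String) :
    report.foldl (fun t s =>
      match PySem.Str.split₀ s with
      | user :: reported :: [] => t.add (user, reported)
      | [] => t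
      | [_] => t
      | _ :: _ :: _ :: _ => t) (PySem.Set.empty : PySem.Set (String × String))
    = pvDistinctReports report := by
  have h : report.foldl (fun t s =>
      match PySem.Str.split₀ s with
      | user :: reported :: [] => t.add (user, reported)
      | [] => t
      | [_] => t
      | _ :: _ :: _ :: _ => t) (PySem.Set.empty : PySem.Set (String × String))
      = report.foldl (fun (t : PySem.Set (String × String)) s =>
          match PySem.Str.split₀ s with
          | [u, r] => t.add (u, r)
          | _ => t) PySem.Set.empty := by
    have hf : (fun (t : PySem.Set (String × String)) s =>
        match PySem.Str.split₀ s with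
        | user :: reported :: [] => t.add (user, reported)
        | [] => t
        | [_] => t
        | _ :: _ :: _ :: _ => t)
        = (fun (t : PySem.Set (String × String)) s =>
            match PySem.Str.split₀ s with
            | [u, r] => t.add (u, r)
            | _ => t) := by
      funext t s
      rcases PySem.Str.split₀ s with _ | ⟨u, _ | ⟨r, _ | l⟩⟩ <;> rfl
    rw [hf]
  rw [h, pv_foldl_parse report (fun (t : PySem.Set (String × String)) p => t.add p) PySem.Set.empty,
    pvDistinctReports, PySem.List.dedup_eq_ofList, PySem.Set.ofList_eq_foldl]
  rfl

-- proof-side names for the intermediate containers of the two ports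
def pvDic0 (id_list : List String) : PySem.Dict String (PySem.Set String) :=
  id_list.foldl (fun d i => d.insert i PySem.Set.empty) PySem.Dict.empty

def pvDic (id_list report : List String) : PySem.Dict String (PySem.Set String) :=
  (report.filterMap pvParse).foldl
    (fun d p => d.modify p.2 PySem.Set.empty (fun t => t.add p.1)) (pvDic0 id_list)

def pvMail0 (id_list : List String) : PySem.Dict String Int :=
  id_list.foldl (fun d i => d.insert i 0) PySem.Dict.empty

def pvCnt (report : List String) : PySem.Dict String Int :=
  (pvDistinctReports report).foldl
    (fun d p => d.insert p.2 (d.getD p.2 0 + 1)) PySem.Dict.empty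

lemma pv_H1 (id_list report : List String) (k : Int)
    (hpre : Pre_solution id_list report k) :
    ∀ p ∈ report.filterMap pvParse, p.2 ∈ id_list ∧
      (p.1 ∈ id_list ∨ (((pvDistinctReports report).countP (fun q => q.2 == p.2) : Int) < k)) := by
  intro p hp
  rcases List.mem_filterMap.mp hp with ⟨s, hs, hps⟩
  rcases hpre s hs with ⟨p', hp', h2, h3⟩
  rw [Option.mem_toList, hps, Option.some_inj] at hp'
  subst hp'
  exact ⟨h2, h3⟩

lemma pv_dic0_keys (id_list : List String) :
    (pvDic0 id_list).keys = PySem.Set.ofList id_list := by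
  have h : (pvDic0 id_list).keys = PySem.Set.update PySem.Dict.empty.keys id_list :=
    PySem.Dict.keys_foldl_insert id_list (fun _ _ => PySem.Set.empty) PySem.Dict.empty
  rw [h, PySem.Dict.keys_empty]
  rfl

lemma pv_mail0_keys (id_list : List String) :
    (pvMail0 id_list).keys = PySem.Set.ofList id_list := by
  have h : (pvMail0 id_list).keys = PySem.Set.update PySem.Dict.empty.keys id_list :=
    PySem.Dict.keys_foldl_insert id_list (fun _ _ => (0 : Int)) PySem.Dict.empty
  rw [h, PySem.Dict.keys_empty]
  rfl

lemma pv_mail0_getD (id_list : List String) (i : String) :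
    (pvMail0 id_list).getD i 0 = 0 := by
  rw [pvMail0, pv_getD_insert_const]
  split
  · rfl
  · exact PySem.Dict.getD_empty ..

lemma pv_dic_keys (id_list report : List String) (k : Int)
    (hpre : Pre_solution id_list report k) :
    (pvDic id_list report).keys = PySem.Set.ofList id_list := by
  have h : (pvDic id_list report).keys
      = PySem.Set.update (pvDic0 id_list).keys ((report.filterMap pvParse).map Prod.snd) :=
    PySem.Dict.keys_foldl_modify_key (report.filterMap pvParse) Prod.snd PySem.Set.empty
      (fun _ p => fun t => t.add p.1) (pvDic0 id_list)
  rw [h, pv_dic0_keys]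
  apply pv_set_update_of_subset
  intro x hx
  rcases List.mem_map.mp hx with ⟨p, hp, rfl⟩
  exact (PySem.Set.mem_ofList id_list p.2).mpr (pv_H1 id_list report k hpre p hp).1

-- each group in A's dict is the reporter set read off the distinct pairs
lemma pv_dic_getD (id_list report : List String) (r : String) :
    (pvDic id_list report).getD r PySem.Set.empty
      = ((pvDistinctReports report).filter (fun p => p.2 == r)).map (·.1) := by
  have h0 : (pvDic0 id_list).getD r PySem.Set.empty = PySem.Set.empty := by
    rw [pvDic0, pv_getD_insert_const]
    split
    · rfl
    · exact PySem.Dict.getD_empty ..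
  rw [pvDic, pv_getD_dic, h0]
  simp only [PySem.Set.empty]
  have h := pv_filter_foldl_add (report.filterMap pvParse) r PySem.Set.empty
  simp only [PySem.Set.empty, List.filter_nil, List.map_nil] at h
  rw [← h]
  rw [pvDistinctReports, PySem.List.dedup_eq_ofList, PySem.Set.ofList_eq_foldl]

lemma pv_cnt_getD (report : List String) (r : String) :
    (pvCnt report).getD r 0 = ((pvDistinctReports report).countP (fun q => q.2 == r) : Int) := by
  have h := PySem.Dict.getD_foldl_insert_add_one ((pvDistinctReports report).map Prod.snd)
    PySem.Dict.empty r
  rw [List.foldl_map] at h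
  have h2 : (pvCnt report).getD r 0
      = PySem.Dict.empty.getD r 0 + (((pvDistinctReports report).map Prod.snd).count r : Int) := h
  rw [h2, PySem.Dict.getD_empty]
  have h3 : ((pvDistinctReports report).map Prod.snd).count r
      = (pvDistinctReports report).countP (fun q => q.2 == r) := by
    simp [List.count_eq_countP, List.countP_map]
    rfl
  rw [h3]
  ring

-- A's port computes, for every id in order, the number of banned distinct pairs naming it
lemma pv_solution_eq (id_list report : List String) (k : Int)
    (hpre : Pre_solution id_list report k) :
    solution id_list report k
      = (PySem.Set.ofList id_list).map (fun i =>
          ((PySem.Set.ofList id_list).countP (fun r =>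
            decide ((i, r) ∈ pvDistinctReports report)
            && decide (k ≤ ((pvDistinctReports report).countP (fun q => q.2 == r) : Int))) : Int)) := by
  have e1 : solution id_list report k =
      ((report.foldl (fun d s =>
          match PySem.Str.split₀ s with
          | [user, reported] => d.modify reported PySem.Set.empty (fun t => t.add user)
          | _ => d) (id_list.foldl (fun d i => d.insert i PySem.Set.empty) PySem.Dict.empty)).values.foldl
        (fun m ids => if k ≤ PySem.Set.len ids then
          ids.foldl (fun m u => m.modify u 0 (fun v => v + 1)) m else m)
        (id_list.foldl (fun d i => d.insert i (0 : Int)) PySem.Dict.empty)).values := rfl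
  rw [e1, pv_dic_eq]
  have hdic : (report.filterMap pvParse).foldl
      (fun d p => d.modify p.2 PySem.Set.empty (fun t => t.add p.1))
      (id_list.foldl (fun d i => d.insert i PySem.Set.empty) PySem.Dict.empty)
      = pvDic id_list report := rfl
  have hm0 : id_list.foldl (fun d i => d.insert i (0 : Int)) PySem.Dict.empty
      = pvMail0 id_list := rfl
  rw [hdic, hm0]
  have hnodup : (pvDic id_list report).keys.Nodup := by
    rw [pv_dic_keys id_list report k hpre]; exact PySem.Set.nodup_ofList id_list
  have hvalues : (pvDic id_list report).values
      = (PySem.Set.ofList id_list).map (fun r => (pvDic id_list report).getD r PySem.Set.empty) := by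
    rw [PySem.Dict.values_eq_map_keys (pvDic id_list report) hnodup PySem.Set.empty,
      pv_dic_keys id_list report k hpre]
  -- length and membership of one group
  have hlen : ∀ r, PySem.Set.len ((pvDic id_list report).getD r PySem.Set.empty)
      = ((pvDistinctReports report).countP (fun q => q.2 == r) : Int) := by
    intro r
    rw [PySem.Set.len, pv_dic_getD, List.length_map, ← List.countP_eq_length_filter]
  have hmemS : ∀ r u, u ∈ (pvDic id_list report).getD r PySem.Set.empty
      ↔ (u, r) ∈ pvDistinctReports report := by
    intro r u
    rw [pv_dic_getD]
    exact pv_mem_fst_filter (pvDistinctReports report) r u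
  -- the final mail dict keeps exactly the id_list keys
  have hkeysA : ((pvDic id_list report).values.foldl
      (fun m ids => if k ≤ PySem.Set.len ids then
        ids.foldl (fun m u => m.modify u 0 (fun v => v + 1)) m else m)
      (pvMail0 id_list)).keys = PySem.Set.ofList id_list := by
    rw [pv_keys_A_mail k _ _ ?h, pv_mail0_keys]
    case h =>
      intro ids hids hk u hu
      rw [hvalues] at hids
      rcases List.mem_map.mp hids with ⟨r, hr, rfl⟩
      have huQ := (hmemS r u).mp hu
      have hup : (u, r) ∈ report.filterMap pvParse :=
        (PySem.List.mem_dedup (report.filterMap pvParse) (u, r)).mp huQ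
      rcases pv_H1 id_list report k hpre (u, r) hup with ⟨_, h2 | h2⟩
      · rw [pv_mail0_keys]; exact (PySem.Set.mem_ofList id_list u).mpr h2
      · exfalso; rw [hlen r] at hk; exact absurd (lt_of_le_of_lt hk h2) (lt_irrefl k)
  have hnodupA : ((pvDic id_list report).values.foldl
      (fun m ids => if k ≤ PySem.Set.len ids then
        ids.foldl (fun m u => m.modify u 0 (fun v => v + 1)) m else m)
      (pvMail0 id_list)).keys.Nodup := by
    rw [hkeysA]; exact PySem.Set.nodup_ofList id_list
  rw [PySem.Dict.values_eq_map_keys _ hnodupA 0, hkeysA]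
  apply List.map_congr_left
  intro i hi
  have hiid : i ∈ id_list := (PySem.Set.mem_ofList id_list i).mp hi
  rw [pv_A_outer, pv_mail0_getD, hvalues, List.map_map]
  have hterm : ∀ r ∈ PySem.Set.ofList id_list,
      ((fun ids => if k ≤ PySem.Set.len ids then (List.count i ids : Int) else 0) ∘
        (fun r => (pvDic id_list report).getD r PySem.Set.empty)) r
      = if (decide ((i, r) ∈ pvDistinctReports report)
            && decide (k ≤ ((pvDistinctReports report).countP (fun q => q.2 == r) : Int))) = true
        then (1 : Int) else 0 := by
    intro r _
    have hnodupS : ((pvDic id_list report).getD r PySem.Set.empty).Nodup := by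
      rw [pv_dic_getD]
      apply List.Nodup.map_on
      · intro x hx y hy hxy
        have hx2 : x.2 = r := by simpa using (List.mem_filter.mp hx).2
        have hy2 : y.2 = r := by simpa using (List.mem_filter.mp hy).2
        exact Prod.ext hxy (hx2.trans hy2.symm)
      · exact (PySem.List.nodup_dedup (report.filterMap pvParse)).filter _
    simp only [Function.comp_apply]
    by_cases hkk : k ≤ ((pvDistinctReports report).countP (fun q => q.2 == r) : Int)
    · have hc : k ≤ PySem.Set.len ((pvDic id_list report).getD r PySem.Set.empty) := by
        rw [hlen r]; exact hkk
      rw [if_pos hc]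
      by_cases hQ : (i, r) ∈ pvDistinctReports report
      · rw [List.count_eq_one_of_mem hnodupS ((hmemS r i).mpr hQ)]
        simp [hQ, hkk]
      · rw [List.count_eq_zero_of_not_mem (fun hm => hQ ((hmemS r i).mp hm))]
        simp [hQ]
    · have hc : ¬ k ≤ PySem.Set.len ((pvDic id_list report).getD r PySem.Set.empty) := by
        rw [hlen r]; exact hkk
      rw [if_neg hc]
      simp [hkk]
  rw [List.map_congr_left hterm, PySem.List.sum_map_ite_one_zero]
  ring

-- B's port computes, for every id in order, the number of distinct banned pairs it reported
lemma pv_solution_alt_eq (id_list report : List String) (k : Int)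
    (hpre : Pre_solution id_list report k) :
    solution_alt id_list report k
      = (PySem.Set.ofList id_list).map (fun i =>
          ((pvDistinctReports report).countP (fun p =>
            decide (k ≤ ((pvDistinctReports report).countP (fun q => q.2 == p.2) : Int))
            && p.1 == i) : Int)) := by
  have e2 : solution_alt id_list report k =
      ((pvDistinctReports report).foldl (fun m p =>
        if k ≤ (pvCnt report).getD p.2 0 then m.modify p.1 0 (fun v => v + 1) else m)
        (pvMail0 id_list)).values := by
    have e0 : solution_alt id_list report k =
        ((report.foldl (fun t s =>
            match PySem.Str.split₀ s with
            | user :: reported :: [] => t.add (user, reported)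
            | [] => t
            | [_] => t
            | _ :: _ :: _ :: _ => t) (PySem.Set.empty : PySem.Set (String × String))).foldl (fun m p =>
          if k ≤ ((report.foldl (fun t s =>
              match PySem.Str.split₀ s with
              | user :: reported :: [] => t.add (user, reported)
              | [] => t
              | [_] => t
              | _ :: _ :: _ :: _ => t) (PySem.Set.empty : PySem.Set (String × String))).foldl
            (fun d p => d.insert p.2 (d.getD p.2 0 + 1)) PySem.Dict.empty).getD p.2 0
          then m.modify p.1 0 (fun v => v + 1) else m)
          (id_list.foldl (fun d i => d.insert i (0 : Int)) PySem.Dict.empty)).values := rfl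
    rw [e0, pv_pairs_eq]
    rfl
  rw [e2]
  have hmem : ∀ p ∈ pvDistinctReports report, k ≤ (pvCnt report).getD p.2 0 → p.1 ∈ (pvMail0 id_list).keys := by
    intro p hp hkp
    have hpp : p ∈ report.filterMap pvParse :=
      (PySem.List.mem_dedup (report.filterMap pvParse) p).mp hp
    rcases pv_H1 id_list report k hpre p hpp with ⟨_, h2 | h2⟩
    · rw [pv_mail0_keys]; exact (PySem.Set.mem_ofList id_list p.1).mpr h2
    · exfalso; rw [pv_cnt_getD report p.2] at hkp
      exact absurd (lt_of_le_of_lt hkp h2) (lt_irrefl k)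
  have hkeysB : ((pvDistinctReports report).foldl (fun m p =>
      if k ≤ (pvCnt report).getD p.2 0 then m.modify p.1 0 (fun v => v + 1) else m)
      (pvMail0 id_list)).keys = PySem.Set.ofList id_list := by
    rw [pv_keys_B_mail _ _ _ hmem, pv_mail0_keys]
  have hnodupB : ((pvDistinctReports report).foldl (fun m p =>
      if k ≤ (pvCnt report).getD p.2 0 then m.modify p.1 0 (fun v => v + 1) else m)
      (pvMail0 id_list)).keys.Nodup := by
    rw [hkeysB]; exact PySem.Set.nodup_ofList id_list
  rw [PySem.Dict.values_eq_map_keys _ hnodupB 0, hkeysB]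
  apply List.map_congr_left
  intro i _
  rw [pv_B_mail (fun p => k ≤ (pvCnt report).getD p.2 0), pv_mail0_getD]
  have hcongr : (pvDistinctReports report).countP
      (fun p => decide (k ≤ (pvCnt report).getD p.2 0) && p.1 == i)
      = (pvDistinctReports report).countP (fun p =>
          decide (k ≤ ((pvDistinctReports report).countP (fun q => q.2 == p.2) : Int))
          && p.1 == i) := by
    apply List.countP_congr
    intro p _
    rw [pv_cnt_getD report p.2]
  rw [hcongr]
  ring

-- the two counts agree: both count the distinct banned pairs naming i
lemma pv_count_bridge (id_list : List String) (k : Int) (Q : List (String × String))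
    (hQnd : Q.Nodup) (hQ2 : ∀ p ∈ Q, p.2 ∈ id_list) (i : String) (N : String → Int) :
    (PySem.Set.ofList id_list).countP (fun r => decide ((i, r) ∈ Q) && decide (k ≤ N r))
      = Q.countP (fun p => decide (k ≤ N p.2) && p.1 == i) := by
  have hL : (PySem.Set.ofList id_list).countP (fun r => decide ((i, r) ∈ Q) && decide (k ≤ N r))
      = List.countP (fun r => decide (k ≤ N r))
          ((PySem.Set.ofList id_list).filter (fun r => decide ((i, r) ∈ Q))) := by
    rw [List.countP_filter]
    exact List.countP_congr (fun x _ => by rw [Bool.and_comm])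
  have hR : Q.countP (fun p => decide (k ≤ N p.2) && p.1 == i)
      = List.countP (fun r => decide (k ≤ N r)) ((Q.filter (fun p => p.1 == i)).map (·.2)) := by
    rw [List.countP_map, List.countP_filter]
    rfl
  rw [hL, hR]
  apply List.Perm.countP_eq
  apply (List.perm_ext_iff_of_nodup ?nd1 ?nd2).mpr
  case nd1 => exact (PySem.Set.nodup_ofList id_list).filter _
  case nd2 =>
    apply List.Nodup.map_on
    · intro x hx y hy hxy
      have hx1 : x.1 = i := by simpa using (List.mem_filter.mp hx).2
      have hy1 : y.1 = i := by simpa using (List.mem_filter.mp hy).2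
      exact Prod.ext (hx1.trans hy1.symm) hxy
    · exact hQnd.filter _
  intro r
  rw [pv_mem_snd_filter Q i r, List.mem_filter]
  constructor
  · rintro ⟨_, hm⟩; simpa using hm
  · intro hm
    exact ⟨(PySem.Set.mem_ofList id_list r).mpr (hQ2 (i, r) hm), by simpa using hm⟩

-- ===== VERDICT (by name: the statement is the Claim_ definition above) =====
theorem solution_spec : Claim_equal_solution := by
  intro id_list report k _hdom hpre
  unfold Spec_solution
  rw [pv_solution_eq id_list report k hpre, pv_solution_alt_eq id_list report k hpre]
  apply List.map_congr_left
  intro i _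
  have hQnd : (pvDistinctReports report).Nodup :=
    PySem.List.nodup_dedup (report.filterMap pvParse)
  have hQ2 : ∀ p ∈ pvDistinctReports report, p.2 ∈ id_list := fun p hp =>
    (pv_H1 id_list report k hpre p
      ((PySem.List.mem_dedup (report.filterMap pvParse) p).mp hp)).1
  exact congrArg Int.ofNat (pv_count_bridge id_list k (pvDistinctReports report) hQnd hQ2 i
    (fun r => ((pvDistinctReports report).countP (fun q => q.2 == r) : Int)))
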